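-- pv_equiv track=rewrite | github.com/alfishe/unreal-ng | tools/idapro/parse_memory_access_log.py | find_code_segments
-- ===== SOURCE A (Python) =====
-- def find_code_segments(access_data):
--     """
--     Analyzes access data to find contiguous blocks of executed code.
--     Returns a list of (start, end) tuples for each code segment.
--     """
--     # Get all addresses with a non-zero execute count
--     code_addrs = sorted([addr for addr, counts in access_data.items() if counts['e'] > 0])
--
--     if not code_addrs:
--         return []
--
--     segments = []
--     seg_start = code_addrs[0]
--
--     for i in range(1, len(code_addrs)):
--         # If the current address is not contiguous with the previous one, end the segment
--         if code_addrs[i] != code_addrs[i-1] + 1: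
--             segments.append((seg_start, code_addrs[i-1]))
--             seg_start = code_addrs[i]
--
--     # Add the last segment
--     segments.append((seg_start, code_addrs[-1]))
--
--     return segments
-- ===== SOURCE B (Python) =====
-- def find_code_segments(access_data):
--     """
--     Analyzes access data to find contiguous blocks of executed code.
--     Returns a list of (start, end) tuples for each code segment.
--     """
--     executed = {addr for addr, counts in access_data.items() if counts['e'] > 0}
--     # An address is a segment start iff its predecessor was not executed,
--     # and a segment end iff its successor was not executed; matching them
--     # in ascending order pairs each start with its end.
--     starts = sorted(a for a in executed if a - 1 not in executed)
--     ends = sorted(a for a in executed if a + 1 not in executed)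
--     return list(zip(starts, ends))
-- ===== Notes on version B (the rewrite author's own statement) =====
-- stated objective: alternative
-- what changed: A sorts the executed addresses and scans them left to right with seg_start/previous-element tracking to cut segments at gaps; B never scans sequentially: it builds the set of executed addresses, selects segment starts (predecessor not executed) and segment ends (successor not executed) by set-membership tests, sorts the two boundary lists and zips them.
import Mathlib
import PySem

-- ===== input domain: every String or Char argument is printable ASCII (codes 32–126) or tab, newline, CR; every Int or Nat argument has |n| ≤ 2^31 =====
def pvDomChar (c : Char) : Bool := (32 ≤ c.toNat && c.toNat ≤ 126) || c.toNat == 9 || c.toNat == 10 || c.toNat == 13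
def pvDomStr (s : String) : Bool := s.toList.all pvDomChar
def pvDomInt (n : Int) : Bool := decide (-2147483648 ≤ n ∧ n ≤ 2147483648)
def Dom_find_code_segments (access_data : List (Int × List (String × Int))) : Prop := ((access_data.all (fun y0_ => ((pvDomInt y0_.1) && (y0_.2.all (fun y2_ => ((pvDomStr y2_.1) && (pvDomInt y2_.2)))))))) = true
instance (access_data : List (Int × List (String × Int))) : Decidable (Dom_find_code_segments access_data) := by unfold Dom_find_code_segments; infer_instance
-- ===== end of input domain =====

-- B replaces A's sorted left-to-right gap scan by a boundary-detection algorithm: it builds the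
-- set of executed addresses, picks segment starts (predecessor not executed) and segment ends
-- (successor not executed) by set-membership tests, sorts both boundary lists and zips them;
-- objective: alternative algorithm, same asymptotic cost.

-- ===== PORT A =====
def find_code_segments (access_data : List (Int × List (String × Int))) : List (Int × Int) :=
  let code_addrs : List Int :=
    PySem.List.sorted
      (access_data.filterMap (fun p =>
        if (((PySem.Dict.mk p.2).get? "e").getD 0) > 0 then some p.1 else none))
      (fun x => x) false
  if code_addrs = [] then []
  else
    let r :=
      (PySem.List.pyRange 1 (code_addrs.length : Int) 1).foldl
        (fun (st : List (Int × Int) × Int) i =>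
          if PySem.List.pyGetD code_addrs i 0 ≠ PySem.List.pyGetD code_addrs (i - 1) 0 + 1 then
            (st.1 ++ [(st.2, PySem.List.pyGetD code_addrs (i - 1) 0)],
             PySem.List.pyGetD code_addrs i 0)
          else st)
        ([], PySem.List.pyGetD code_addrs 0 0)
    r.1 ++ [(r.2, PySem.List.pyGetD code_addrs (-1) 0)]

-- ===== PORT B =====
def find_code_segments_alt (access_data : List (Int × List (String × Int))) : List (Int × Int) :=
  let executed : PySem.Set Int :=
    PySem.Set.ofList (access_data.filterMap (fun p =>
      if (((PySem.Dict.mk p.2).get? "e").getD 0) > 0 then some p.1 else none))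
  let starts :=
    PySem.List.sorted (executed.filter (fun a => !(PySem.Set.contains executed (a - 1))))
      (fun x => x) false
  let ends :=
    PySem.List.sorted (executed.filter (fun a => !(PySem.Set.contains executed (a + 1))))
      (fun x => x) false
  starts.zip ends

-- ===== PRECONDITION & SPEC =====
-- Pre_ excludes (i) inputs where some counts dict has no key "e": there the Python A raises
-- KeyError; and (ii) association lists with a duplicate address key, which cannot arise from
-- A's dict argument (dict keys are unique) and on which the list representation is ambiguous.
def Pre_find_code_segments (access_data : List (Int × List (String × Int))) : Prop :=
  (∀ p ∈ access_data, p.2.any (fun q => q.1 == "e") = true) ∧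
  (access_data.map Prod.fst).Nodup
instance (access_data : List (Int × List (String × Int))) : Decidable (Pre_find_code_segments access_data) := by unfold Pre_find_code_segments; infer_instance

def pvWitness_find_code_segments : (List (Int × List (String × Int))) :=
  [(5, [("e", 1)]), (7, [("e", 1), ("r", 0)]), (6, [("e", 0)])]

def Spec_find_code_segments (access_data : List (Int × List (String × Int))) (out : List (Int × Int)) : Prop := out = find_code_segments_alt access_data
instance (access_data : List (Int × List (String × Int))) (out : List (Int × Int)) : Decidable (Spec_find_code_segments access_data out) := by unfold Spec_find_code_segments; infer_instance

-- ===== CLAIM (what is proved, stated in full; the proofs are below) =====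
def Claim_equal_find_code_segments : Prop := ∀ (access_data : List (Int × List (String × Int))), Dom_find_code_segments access_data → Pre_find_code_segments access_data → Spec_find_code_segments access_data (find_code_segments access_data)

-- ===== LEMMAS AND PROOFS =====

-- A's post-sort computation, written out as a standalone function of the sorted list.
def pvASeg (c : List Int) : List (Int × Int) :=
  if c = [] then []
  else
    let r :=
      (PySem.List.pyRange 1 (c.length : Int) 1).foldl
        (fun (st : List (Int × Int) × Int) i =>
          if PySem.List.pyGetD c i 0 ≠ PySem.List.pyGetD c (i - 1) 0 + 1 then
            (st.1 ++ [(st.2, PySem.List.pyGetD c (i - 1) 0)], PySem.List.pyGetD c i 0)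
          else st)
        ([], PySem.List.pyGetD c 0 0)
    r.1 ++ [(r.2, PySem.List.pyGetD c (-1) 0)]

-- the run decomposition both algorithms compute, as a structural recursion
def pvChunk (s prev : Int) : List Int → List (Int × Int)
  | [] => [(s, prev)]
  | y :: ys => if y ≠ prev + 1 then (s, prev) :: pvChunk y y ys else pvChunk s y ys

def pvSetStart (s : Int) : List (Int × Int) → List (Int × Int)
  | [] => []
  | (_, e) :: r => (s, e) :: r

theorem pvChunk_ne_nil (s prev : Int) (xs : List Int) : pvChunk s prev xs ≠ [] := by
  induction xs generalizing s prev with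
  | nil => simp [pvChunk]
  | cons y ys ih => simp only [pvChunk]; split <;> [simp; exact ih _ _]

theorem pvChunk_snoc_ne (ys : List Int) (x s y : Int)
    (h : y ≠ (x :: ys).getLast (by simp) + 1) :
    pvChunk s x (ys ++ [y]) = pvChunk s x ys ++ [(y, y)] := by
  induction ys generalizing x s with
  | nil =>
    simp only [List.getLast_singleton] at h
    simp [pvChunk, h]
  | cons z zs ih =>
    rw [List.getLast_cons (by simp)] at h
    show (if z ≠ x + 1 then (s, x) :: pvChunk z z (zs ++ [y]) else pvChunk s z (zs ++ [y]))
        = (if z ≠ x + 1 then (s, x) :: pvChunk z z zs else pvChunk s z zs) ++ [(y, y)]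
    by_cases hz : z = x + 1
    · rw [if_neg (by omega), if_neg (by omega)]
      exact ih z s h
    · rw [if_pos hz, if_pos hz, ih z z h]
      rfl

theorem pvChunk_snoc_eq (ys : List Int) (x s y : Int)
    (h : y = (x :: ys).getLast (by simp) + 1)
    (u : List (Int × Int)) (v L : Int) (hu : pvChunk s x ys = u ++ [(v, L)]) :
    pvChunk s x (ys ++ [y]) = u ++ [(v, y)] := by
  induction ys generalizing x s u with
  | nil =>
    simp only [List.getLast_singleton] at h
    cases u with
    | cons p u' =>
      exfalso
      have := congrArg List.length hu
      simp [pvChunk] at this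
    | nil =>
      have h1 : s = v ∧ x = L := by simpa [pvChunk, Prod.ext_iff] using hu
      obtain ⟨h1, h2⟩ := h1
      subst h1
      simp [pvChunk, h]
  | cons z zs ih =>
    rw [List.getLast_cons (by simp)] at h
    show (if z ≠ x + 1 then (s, x) :: pvChunk z z (zs ++ [y]) else pvChunk s z (zs ++ [y])) = u ++ [(v, y)]
    have hu' : (if z ≠ x + 1 then (s, x) :: pvChunk z z zs else pvChunk s z zs) = u ++ [(v, L)] := hu
    by_cases hz : z = x + 1
    · rw [if_neg (by omega)] at hu'
      rw [if_neg (by omega)]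
      exact ih z s h u hu'
    · rw [if_pos hz] at hu'
      rw [if_pos hz]
      cases u with
      | nil =>
        exfalso
        simp only [List.nil_append] at hu'
        have h2 : pvChunk z z zs = [] := by
          have := (List.cons.injEq _ _ _ _).mp hu'.symm
          exact this.2.symm
        exact pvChunk_ne_nil _ _ _ h2
      | cons p u' =>
        have h2 := (List.cons.injEq _ _ _ _).mp hu'
        rw [h2.1]
        rw [List.cons_append]
        congr 1
        exact ih z z h u' h2.2

theorem pvALoop_eq (xs : List Int) (x s : Int) (acc : List (Int × Int)) :
    (let r :=
      (PySem.List.pyRange 1 ((x :: xs).length : Int) 1).foldl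
        (fun (st : List (Int × Int) × Int) i =>
          if PySem.List.pyGetD (x :: xs) i 0 ≠ PySem.List.pyGetD (x :: xs) (i - 1) 0 + 1 then
            (st.1 ++ [(st.2, PySem.List.pyGetD (x :: xs) (i - 1) 0)],
             PySem.List.pyGetD (x :: xs) i 0)
          else st)
        (acc, s)
     r.1 ++ [(r.2, (x :: xs).getLast (by simp))]) = acc ++ pvChunk s x xs := by
  induction xs using List.reverseRecOn generalizing x s acc with
  | nil =>
    simp [PySem.List.pyRange_one_eq_nil, pvChunk]
  | append_singleton ys y ih =>
    have hcons : x :: (ys ++ [y]) = (x :: ys) ++ [y] := rfl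
    have hlen : ((x :: (ys ++ [y])).length : Int) = ((x :: ys).length : Int) + 1 := by
      simp only [List.length_cons, List.length_append, List.length_nil]
      push_cast; omega
    have hlen1 : ((x :: ys).length : Int) = (ys.length : Int) + 1 := by
      simp only [List.length_cons]; push_cast; omega
    rw [hlen, PySem.List.pyRange_one_succ_right (by rw [hlen1]; omega)]
    rw [List.foldl_append]
    have hswap : ∀ (st : List (Int × Int) × Int), ∀ i ∈ PySem.List.pyRange 1 ((x :: ys).length : Int) 1,
        (fun (st : List (Int × Int) × Int) i =>
          if PySem.List.pyGetD (x :: (ys ++ [y])) i 0 ≠ PySem.List.pyGetD (x :: (ys ++ [y])) (i - 1) 0 + 1 then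
            (st.1 ++ [(st.2, PySem.List.pyGetD (x :: (ys ++ [y])) (i - 1) 0)],
             PySem.List.pyGetD (x :: (ys ++ [y])) i 0)
          else st) st i
        = (fun (st : List (Int × Int) × Int) i =>
          if PySem.List.pyGetD (x :: ys) i 0 ≠ PySem.List.pyGetD (x :: ys) (i - 1) 0 + 1 then
            (st.1 ++ [(st.2, PySem.List.pyGetD (x :: ys) (i - 1) 0)],
             PySem.List.pyGetD (x :: ys) i 0)
          else st) st i := by
      intro st i hi
      rw [PySem.List.mem_pyRange_one, hlen1] at hi
      have hg1 : PySem.List.pyGetD (x :: (ys ++ [y])) i 0 = PySem.List.pyGetD (x :: ys) i 0 := by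
        rw [hcons, PySem.List.pyGetD_eq_getElem _ _ (by omega)
              (by simp only [List.length_append, List.length_cons, List.length_nil]; push_cast; omega),
            PySem.List.pyGetD_eq_getElem _ _ (by omega)
              (by simp only [List.length_cons]; push_cast; omega)]
        exact List.getElem_append_left (by simp only [List.length_cons]; omega)
      have hg2 : PySem.List.pyGetD (x :: (ys ++ [y])) (i - 1) 0 = PySem.List.pyGetD (x :: ys) (i - 1) 0 := by
        rw [hcons, PySem.List.pyGetD_eq_getElem _ _ (by omega)
              (by simp only [List.length_append, List.length_cons, List.length_nil]; push_cast; omega),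
            PySem.List.pyGetD_eq_getElem _ _ (by omega)
              (by simp only [List.length_cons]; push_cast; omega)]
        exact List.getElem_append_left (by simp only [List.length_cons]; omega)
      simp only [hg1, hg2]
    rw [PySem.List.foldl_congr_mem _ _ _ _ hswap]
    have ihx := ih x s acc
    simp only [] at ihx
    set r' := (PySem.List.pyRange 1 ((x :: ys).length : Int) 1).foldl
        (fun (st : List (Int × Int) × Int) i =>
          if PySem.List.pyGetD (x :: ys) i 0 ≠ PySem.List.pyGetD (x :: ys) (i - 1) 0 + 1 then
            (st.1 ++ [(st.2, PySem.List.pyGetD (x :: ys) (i - 1) 0)],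
             PySem.List.pyGetD (x :: ys) i 0)
          else st)
        (acc, s) with hr'
    have hgm : PySem.List.pyGetD (x :: (ys ++ [y])) ((x :: ys).length : Int) 0 = y := by
      rw [hcons, PySem.List.pyGetD_eq_getElem _ _ (by positivity)
            (by simp only [List.length_append, List.length_cons, List.length_nil]; push_cast; omega)]
      exact List.getElem_concat_length (by simp) _
    have hL : (x :: ys).getLast (by simp) = (x :: ys)[ys.length]'(by simp) := by
      rw [List.getLast_eq_getElem]
      simp only [List.length_cons, Nat.add_sub_cancel]
      rfl
    have hgm1 : PySem.List.pyGetD (x :: (ys ++ [y])) (((x :: ys).length : Int) - 1) 0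
        = (x :: ys).getLast (by simp) := by
      rw [hcons, PySem.List.pyGetD_eq_getElem _ _ (by rw [hlen1]; omega)
            (by simp only [List.length_append, List.length_cons, List.length_nil]; push_cast; omega)]
      rw [hL]
      have ht : (((x :: ys).length : Int) - 1).toNat = ys.length := by
        rw [hlen1]; omega
      simp only [ht]
      exact List.getElem_append_left (by simp only [List.length_cons]; omega)
    have hlast : (x :: (ys ++ [y])).getLast (by simp) = y := by
      rw [List.getLast_cons (by simp)]
      exact List.getLast_concat
    simp only [List.foldl_cons, List.foldl_nil, hgm, hgm1, hlast]
    by_cases hy : y = (x :: ys).getLast (by simp) + 1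
    · rw [if_neg (by omega)]
      obtain ⟨u, v, L, hu⟩ : ∃ u v L, pvChunk s x ys = u ++ [(v, L)] :=
        ⟨(pvChunk s x ys).dropLast, ((pvChunk s x ys).getLast (pvChunk_ne_nil _ _ _)).1,
         ((pvChunk s x ys).getLast (pvChunk_ne_nil _ _ _)).2,
         by simpa using (List.dropLast_concat_getLast (pvChunk_ne_nil s x ys)).symm⟩
      rw [pvChunk_snoc_eq ys x s y hy u v L hu]
      rw [hu] at ihx
      have hsplit : r'.1 = acc ++ u ∧ (r'.2, (x :: ys).getLast (by simp)) = (v, L) := by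
        have h2 : r'.1 ++ [(r'.2, (x :: ys).getLast (by simp))] = (acc ++ u) ++ [(v, L)] := by
          rw [ihx]; simp [List.append_assoc]
        have h3 : r'.1.concat (r'.2, (x :: ys).getLast (by simp)) = (acc ++ u).concat (v, L) := by
          simpa [List.concat_eq_append] using h2
        exact List.concat_inj.mp h3
      obtain ⟨h1, h2⟩ := hsplit
      have hv : r'.2 = v := (Prod.mk.inj h2).1
      rw [h1, hv, List.append_assoc]
    · rw [if_pos (by omega)]
      rw [pvChunk_snoc_ne ys x s y hy]
      simp only []
      rw [← List.append_assoc, ihx, List.append_assoc]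

theorem pvASeg_chunk (x : Int) (xs : List Int) :
    pvASeg (x :: xs) = pvChunk x x xs := by
  have h1 := pvALoop_eq xs x x ([])
  simp only [] at h1
  unfold pvASeg
  rw [if_neg (List.cons_ne_nil x xs)]
  simp only [PySem.List.pyGetD_zero_cons]
  rw [PySem.List.pyGetD_neg_one _ 0 (List.cons_ne_nil x xs)]
  rw [h1, List.nil_append]

theorem pvChunk_setStart (xs : List Int) (s p : Int) :
    pvChunk s p xs = pvSetStart s (pvChunk p p xs) := by
  induction xs generalizing s p with
  | nil => rfl
  | cons y ys ih =>
    show (if y ≠ p + 1 then (s, p) :: pvChunk y y ys else pvChunk s y ys)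
        = pvSetStart s (if y ≠ p + 1 then (p, p) :: pvChunk y y ys else pvChunk p y ys)
    by_cases hy : y = p + 1
    · rw [if_neg (by omega), if_neg (by omega), ih s y, ih p y]
      cases h : pvChunk y y ys with
      | nil => exact absurd h (pvChunk_ne_nil _ _ _)
      | cons q r => cases q; rfl
    · rw [if_pos hy, if_pos hy]; rfl

-- boundary detection on a strictly increasing list is exactly the run decomposition
theorem pvZipChunk (x : Int) (xs : List Int)
    (h : (x :: xs).Pairwise (· < ·)) :
    ((x :: xs).filter (fun a => !(decide (a - 1 ∈ (x :: xs))))).zip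
      ((x :: xs).filter (fun a => !(decide (a + 1 ∈ (x :: xs))))) = pvChunk x x xs := by
  induction xs generalizing x with
  | nil =>
    simp [pvChunk]
  | cons y ys ih =>
    rw [List.pairwise_cons] at h
    obtain ⟨hx, hys⟩ := h
    have hxy : x < y := hx y (by simp)
    have hxys : ∀ z ∈ ys, x < z := fun z hz => hx z (by simp [hz])
    have hyys : ∀ z ∈ ys, y < z := fun z hz =>
      (List.pairwise_cons.mp hys).1 z hz
    -- head tests
    have hpsx : ¬ (x - 1 ∈ (x :: y :: ys)) := by
      intro hmem
      rcases List.mem_cons.mp hmem with h1 | hmem2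
      · omega
      rcases List.mem_cons.mp hmem2 with h1 | h1
      · omega
      · have := hxys _ h1; omega
    -- tail filters reduce to the tail's own membership tests
    have hps_tail : (y :: ys).filter (fun a => !(decide (a - 1 ∈ (x :: y :: ys))))
        = (y :: ys).filter (fun a => decide (a ≠ x + 1) && !(decide (a - 1 ∈ (y :: ys)))) := by
      refine List.filter_congr (fun a _ => ?_)
      by_cases hax : a - 1 = x
      · have hmem : a - 1 ∈ x :: y :: ys := by simp [hax]
        simp [hmem, show ¬ a ≠ x + 1 by omega]
      · have hiff : (a - 1 ∈ x :: y :: ys) ↔ (a - 1 ∈ y :: ys) := by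
          simp [List.mem_cons, hax]
        simp [hiff, show a ≠ x + 1 by omega]
    have hpe_tail : (y :: ys).filter (fun a => !(decide (a + 1 ∈ (x :: y :: ys))))
        = (y :: ys).filter (fun a => !(decide (a + 1 ∈ (y :: ys)))) := by
      refine List.filter_congr (fun a ha => ?_)
      have hagt : x < a := by
        rcases List.mem_cons.mp ha with h1 | h1
        · omega
        · exact hxys _ h1
      have hiff : (a + 1 ∈ x :: y :: ys) ↔ (a + 1 ∈ y :: ys) := by
        simp [List.mem_cons, show ¬ (a + 1 = x) by omega]
      simp [hiff]
    by_cases hcase : y = x + 1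
    · -- contiguous: x extends the first run
      have hps_ys : ys.filter (fun a => decide (a ≠ x + 1) && !(decide (a - 1 ∈ (y :: ys))))
          = ys.filter (fun a => !(decide (a - 1 ∈ (y :: ys)))) := by
        refine List.filter_congr (fun a ha => ?_)
        have := hyys _ ha
        simp [show a ≠ x + 1 by omega]
      have hpsy' : ¬ (y - 1 ∈ (y :: ys)) := by
        intro hmem
        rcases List.mem_cons.mp hmem with h1 | h1
        · omega
        · have := hyys _ h1; omega
      have hS : (x :: y :: ys).filter (fun a => !(decide (a - 1 ∈ (x :: y :: ys))))
          = x :: ys.filter (fun a => !(decide (a - 1 ∈ (y :: ys)))) := by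
        rw [List.filter_cons, if_pos (by simp [hpsx]), hps_tail, List.filter_cons,
            if_neg (by simp [hcase]), hps_ys]
      have hpex : x + 1 ∈ (x :: y :: ys) := by simp [hcase]
      have hE : (x :: y :: ys).filter (fun a => !(decide (a + 1 ∈ (x :: y :: ys))))
          = (y :: ys).filter (fun a => !(decide (a + 1 ∈ (y :: ys)))) := by
        rw [List.filter_cons, if_neg (by simp [hpex]), hpe_tail]
      have hS' : (y :: ys).filter (fun a => !(decide (a - 1 ∈ (y :: ys))))
          = y :: ys.filter (fun a => !(decide (a - 1 ∈ (y :: ys)))) := by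
        rw [List.filter_cons, if_pos (by simp [hpsy'])]
      have ihy := ih y hys
      rw [hS'] at ihy
      rw [hS, hE]
      rw [show pvChunk x x (y :: ys) = pvChunk x y ys by simp [pvChunk, hcase],
          pvChunk_setStart ys x y, ← ihy]
      cases hEt : (y :: ys).filter (fun a => !(decide (a + 1 ∈ (y :: ys)))) with
      | nil => rfl
      | cons e E => rfl
    · -- gap: x is a singleton run before the rest
      have hps_ys' : (y :: ys).filter (fun a => decide (a ≠ x + 1) && !(decide (a - 1 ∈ (y :: ys))))
          = (y :: ys).filter (fun a => !(decide (a - 1 ∈ (y :: ys)))) := by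
        refine List.filter_congr (fun a ha => ?_)
        have hane : a ≠ x + 1 := by
          rcases List.mem_cons.mp ha with h1 | h1
          · omega
          · have := hyys _ h1; omega
        simp [hane]
      have hpex : ¬ (x + 1 ∈ (x :: y :: ys)) := by
        intro hmem
        rcases List.mem_cons.mp hmem with h1 | hmem2
        · omega
        rcases List.mem_cons.mp hmem2 with h1 | h1
        · omega
        · have := hyys _ h1; omega
      have hS : (x :: y :: ys).filter (fun a => !(decide (a - 1 ∈ (x :: y :: ys))))
          = x :: (y :: ys).filter (fun a => !(decide (a - 1 ∈ (y :: ys)))) := by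
        rw [List.filter_cons, if_pos (by simp [hpsx]), hps_tail, hps_ys']
      have hE : (x :: y :: ys).filter (fun a => !(decide (a + 1 ∈ (x :: y :: ys))))
          = x :: (y :: ys).filter (fun a => !(decide (a + 1 ∈ (y :: ys)))) := by
        rw [List.filter_cons, if_pos (by simp [hpex]), hpe_tail]
      rw [hS, hE, List.zip_cons_cons, ih y hys]
      simp [pvChunk, hcase]

-- the executed-address list is a sublist of the key list, hence Nodup under Pre_
theorem pvFilterMap_fst_sublist {α β : Type} (l : List (α × β)) (g : α × β → Prop)
    [DecidablePred g] :
    (l.filterMap (fun p => if g p then some p.1 else none)).Sublist (l.map Prod.fst) := by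
  induction l with
  | nil => simp
  | cons p t ih =>
    by_cases hg : g p
    · simpa [List.filterMap_cons, hg] using ih.cons₂ p.1
    · simpa [List.filterMap_cons, hg] using ih.cons p.1

theorem pvContains_eq (s : List Int) (c : List Int)
    (hmem : ∀ z : Int, z ∈ s ↔ z ∈ c) (z : Int) :
    PySem.Set.contains s z = decide (z ∈ c) := by
  have h1 : PySem.Set.contains s z = decide (z ∈ s) := by
    simp [PySem.Set.contains]
  rw [h1]
  simp [hmem z]

-- ===== VERDICT (by name: the statement is the Claim_ definition above) =====
theorem find_code_segments_spec : Claim_equal_find_code_segments := by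
  intro ad _ hpre
  obtain ⟨_, hnd⟩ := hpre
  show find_code_segments ad = find_code_segments_alt ad
  set addrs : List Int :=
    ad.filterMap (fun p =>
      if (((PySem.Dict.mk p.2).get? "e").getD 0) > 0 then some p.1 else none) with haddrs
  have haddrnd : addrs.Nodup :=
    (pvFilterMap_fst_sublist ad _).nodup hnd
  set c : List Int := PySem.List.sorted (PySem.Set.ofList addrs) (fun x => x) false with hc
  have hlt : c.Pairwise (· < ·) := PySem.List.sorted_ofList_pairwise_lt addrs
  have hperm1 : c.Perm (PySem.Set.ofList addrs) := PySem.List.sorted_perm _ _ _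
  have hperm2 : (PySem.Set.ofList addrs).Perm addrs :=
    (List.perm_ext_iff_of_nodup (PySem.Set.nodup_ofList addrs) haddrnd).mpr
      (fun z => PySem.Set.mem_ofList addrs z)
  have hmemc : ∀ z : Int, z ∈ PySem.Set.ofList addrs ↔ z ∈ c :=
    fun z => (hperm1.mem_iff).symm
  -- A's sorted list is c
  have hA : PySem.List.sorted addrs (fun x => x) false = c :=
    PySem.List.sorted_eq_of_perm_of_pairwise_lt _ _ _ (hperm1.trans hperm2) hlt
  -- B's two boundary lists are the corresponding filters of c
  have hfilters : ∀ p : Int → Bool,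
      PySem.List.sorted ((PySem.Set.ofList addrs).filter p) (fun x => x) false = c.filter p := by
    intro p
    refine PySem.List.sorted_eq_of_perm_of_pairwise_lt _ _ _
      (List.Perm.filter p hperm1) (List.Pairwise.sublist List.filter_sublist hlt)
  have hcongr : ∀ sgn : Int,
      (fun a : Int => !(PySem.Set.contains (PySem.Set.ofList addrs) (a + sgn)))
        = (fun a : Int => !(decide (a + sgn ∈ c))) := by
    intro sgn
    funext a
    rw [pvContains_eq _ c hmemc]
  show pvASeg (PySem.List.sorted addrs (fun x => x) false)
      = (PySem.List.sorted ((PySem.Set.ofList addrs).filter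
            (fun a => !(PySem.Set.contains (PySem.Set.ofList addrs) (a - 1)))) (fun x => x) false).zip
        (PySem.List.sorted ((PySem.Set.ofList addrs).filter
            (fun a => !(PySem.Set.contains (PySem.Set.ofList addrs) (a + 1)))) (fun x => x) false)
  rw [hA, hfilters, hfilters]
  have hsub : (fun a : Int => !(PySem.Set.contains (PySem.Set.ofList addrs) (a - 1)))
      = (fun a : Int => !(decide (a - 1 ∈ c))) := by
    funext a
    rw [pvContains_eq _ c hmemc]
  have hadd : (fun a : Int => !(PySem.Set.contains (PySem.Set.ofList addrs) (a + 1)))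
      = (fun a : Int => !(decide (a + 1 ∈ c))) := by
    funext a
    rw [pvContains_eq _ c hmemc]
  rw [hsub, hadd]
  cases hcc : c with
  | nil => rfl
  | cons x xs =>
    rw [pvASeg_chunk, pvZipChunk x xs (hcc ▸ hlt)]
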